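-- pv_equiv track=rewrite | github.com/wrstdani/urjc-ai | 1. first_course/programming/python/exercises/damas.py | fillV2
-- ===== SOURCE A (Python) =====
-- def fillV2(tablero):
--     for fila in range(len(tablero)):
--         for col in range(len(tablero[fila])):
--             if (fila + col) % 2 == 0:
--                 if fila < 3:
--                     tablero[fila][col] = 1
--
--                 elif fila > 4:
--                     tablero[fila][col] = 2
--     return tablero
-- ===== SOURCE B (Python) =====
-- def fillV2(tablero):
--     for fila, row in enumerate(tablero):
--         if fila < 3:
--             v = 1
--         elif fila > 4:
--             v = 2
--         else:
--             continue
--         for col in range(fila % 2, len(row), 2):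
--             row[col] = v
--     return tablero
-- ===== Notes on version B (the rewrite author's own statement) =====
-- stated objective: simpler
-- what changed: B decides each row's fill value once from the row index (skipping rows 3-4 entirely) and writes only the even-parity cells via a stride-2 column range starting at fila % 2, instead of A's full nested scan over every cell with a per-cell (fila+col) % 2 test and per-cell row-index branching.
import Mathlib
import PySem

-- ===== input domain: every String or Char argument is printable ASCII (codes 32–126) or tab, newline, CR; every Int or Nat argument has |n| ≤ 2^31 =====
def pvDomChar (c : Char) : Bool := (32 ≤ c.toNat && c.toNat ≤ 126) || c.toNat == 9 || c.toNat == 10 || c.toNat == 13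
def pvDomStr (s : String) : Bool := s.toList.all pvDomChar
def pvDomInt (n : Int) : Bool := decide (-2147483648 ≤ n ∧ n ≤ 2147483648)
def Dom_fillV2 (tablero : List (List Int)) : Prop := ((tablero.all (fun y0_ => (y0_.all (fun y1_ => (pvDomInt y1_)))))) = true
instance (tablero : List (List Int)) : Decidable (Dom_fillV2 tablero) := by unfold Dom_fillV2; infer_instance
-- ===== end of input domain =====

-- B skips rows 3–4 up front and writes only the even-parity cells via a stride-2 column range,
-- replacing A's full nested scan with per-cell parity test ('simpler' decomposition).
-- Both Pythons mutate tablero in place and return it; the equivalence proved here is about the return value.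

-- ===== PORT A =====
-- Literal transliteration: both for-loops are folds over range(len(...)); the element
-- assignment tablero[fila][col] = v (indices known nonnegative and in range) is List.set.
def fillV2 (tablero : List (List Int)) : List (List Int) :=
  (List.range tablero.length).foldl (fun tb fila =>
    (List.range ((tb.getD fila []).length)).foldl (fun tb2 col =>
      if (fila + col) % 2 == 0 then
        if fila < 3 then tb2.set fila ((tb2.getD fila []).set col 1)
        else if 4 < fila then tb2.set fila ((tb2.getD fila []).set col 2)
        else tb2
      else tb2) tb) tablero

-- ===== PORT B =====
-- row[col] = v for col drawn from range(fila % 2, len(row), 2); col is nonnegative, so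
-- List.set col.toNat is exact. fila ≥ 0, so `fila % 2` is PySem.Int.mod fila 2.
def pvFillRowB (fila : Int) (v : Int) (row : List Int) : List Int :=
  (PySem.List.pyRange (PySem.Int.mod fila 2) (row.length : Int) 2).foldl
    (fun r col => r.set col.toNat v) row

-- for fila, row in enumerate(tablero): each row is replaced by its filled version (in place);
-- the resulting board is the map of that per-row transformation over the enumerated rows.
def fillV2_alt (tablero : List (List Int)) : List (List Int) :=
  (PySem.List.enumerate tablero 0).map (fun p =>
    if p.1 < 3 then pvFillRowB p.1 1 p.2
    else if 4 < p.1 then pvFillRowB p.1 2 p.2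
    else p.2)

-- ===== PRECONDITION & SPEC =====
def Spec_fillV2 (tablero : List (List Int)) (out : List (List Int)) : Prop := out = fillV2_alt tablero
instance (tablero : List (List Int)) (out : List (List Int)) : Decidable (Spec_fillV2 tablero out) := by unfold Spec_fillV2; infer_instance

-- ===== CLAIM (what is proved, stated in full; the proofs are below) =====
def Claim_equal_fillV2 : Prop := ∀ (tablero : List (List Int)), Dom_fillV2 tablero → Spec_fillV2 tablero (fillV2 tablero)

-- ===== LEMMAS AND PROOFS =====

/-- Element view of a fold of sets (all writing the same value `v`). -/
theorem pv_foldl_set_getElem? (v : Int) (cols : List Nat) (row : List Int) (j : Nat) :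
    (cols.foldl (fun r c => r.set c v) row)[j]? =
      if j ∈ cols ∧ j < row.length then some v else row[j]? := by
  induction cols generalizing row with
  | nil => simp
  | cons c cs ih =>
    rw [List.foldl_cons, ih, List.length_set]
    by_cases hl : j < row.length
    · by_cases hcs : j ∈ cs
      · simp [hcs, hl, List.mem_cons]
      · by_cases hcj : c = j
        · subst hcj
          simp [hcs, hl]
        · have hjc : j ≠ c := fun h => hcj h.symm
          simp [hcs, hcj, hjc, hl, List.mem_cons]
    · have h1 : (row.set c v)[j]? = none :=
        List.getElem?_eq_none (by simp [List.length_set]; omega)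
      have h2 : row[j]? = none := List.getElem?_eq_none (by omega)
      simp [hl]

/-- A's inner column loop, for a fixed row index and fill value. -/
def pvRowA (fila : Nat) (v : Int) (row : List Int) : List Int :=
  (List.range row.length).foldl (fun r col => if (fila + col) % 2 == 0 then r.set col v else r) row

/-- The two column index sets coincide: stride-2 columns starting at `fila % 2`
    are exactly the columns of even `fila + col` parity. -/
theorem pv_cols_mem (fila : Nat) (len : Nat) (j : Nat) :
    (j ∈ ((PySem.List.pyRange (PySem.Int.mod (fila : Int) 2) (len : Int) 2).map Int.toNat) ↔
     j ∈ (List.range len).filter (fun c => (fila + c) % 2 == 0)) := by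
  have hmod : PySem.Int.mod (fila : Int) 2 = (fila : Int) % 2 :=
    PySem.Int.mod_eq_emod_of_pos (by norm_num)
  simp only [List.mem_map, List.mem_filter, List.mem_range, hmod,
    PySem.List.mem_pyRange_iff_of_pos (by norm_num : (0:Int) < 2), beq_iff_eq]
  constructor
  · rintro ⟨x, ⟨h1, h2, h3⟩, rfl⟩
    omega
  · rintro ⟨h1, h2⟩
    exact ⟨(j : Int), ⟨by omega, by omega, by omega⟩, by omega⟩

/-- B's row fill equals A's row loop. -/
theorem pv_row_eq (fila : Nat) (v : Int) (row : List Int) :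
    pvFillRowB (fila : Int) v row = pvRowA fila v row := by
  unfold pvFillRowB pvRowA
  have hB : (PySem.List.pyRange (PySem.Int.mod (fila : Int) 2) (row.length : Int) 2).foldl
      (fun r col => r.set col.toNat v) row
      = ((PySem.List.pyRange (PySem.Int.mod (fila : Int) 2) (row.length : Int) 2).map Int.toNat).foldl
        (fun r c => r.set c v) row :=
    (@List.foldl_map Int Nat (List Int) Int.toNat (fun r c => r.set c v)
      (PySem.List.pyRange (PySem.Int.mod (fila : Int) 2) (row.length : Int) 2) row).symm
  have hA : (List.range row.length).foldl
      (fun r col => if (fila + col) % 2 == 0 then r.set col v else r) row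
      = ((List.range row.length).filter (fun c => (fila + c) % 2 == 0)).foldl
        (fun r c => r.set c v) row :=
    (@List.foldl_filter Nat (List Int) (fun c => (fila + c) % 2 == 0)
      (fun r c => r.set c v) (List.range row.length) row).symm
  rw [hB, hA]
  apply List.ext_getElem?
  intro j
  rw [pv_foldl_set_getElem?, pv_foldl_set_getElem?]
  exact if_congr (and_congr_left' (pv_cols_mem fila row.length j)) rfl rfl

/-- What one row becomes, as a function of its index. -/
def pvSpecRow (fila : Nat) (row : List Int) : List Int :=
  if fila < 3 then pvRowA fila 1 row
  else if 4 < fila then pvRowA fila 2 row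
  else row

/-- B is `mapIdx pvSpecRow`. -/
theorem pv_alt_eq (tablero : List (List Int)) :
    fillV2_alt tablero = tablero.mapIdx pvSpecRow := by
  unfold fillV2_alt
  rw [PySem.List.enumerate_eq_zipIdx_map, List.map_map, List.mapIdx_eq_zipIdx_map]
  apply List.map_congr_left
  rintro ⟨row, i⟩ _
  simp only [Function.comp, zero_add, pvSpecRow]
  by_cases h3 : i < 3
  · rw [if_pos (by exact_mod_cast h3), if_pos h3, pv_row_eq]
  · rw [if_neg (by exact_mod_cast h3), if_neg h3]
    by_cases h4 : 4 < i
    · rw [if_pos (by exact_mod_cast h4), if_pos h4, pv_row_eq]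
    · rw [if_neg (by exact_mod_cast h4), if_neg h4]

theorem pv_foldl_id {α β : Type} (l : List α) (s : β) :
    l.foldl (fun s _ => s) s = s := by
  induction l generalizing s with
  | nil => rfl
  | cons a as ih => simp only [List.foldl_cons]; exact ih s

/-- Pull the repeated `tb2.set fila` of the inner loop out to a single outer set. -/
theorem pv_inner_set (fila : Nat) (v : Int) (p : Nat → Bool) (cols : List Nat)
    (tb : List (List Int)) (h : fila < tb.length) :
    cols.foldl (fun tb2 col =>
        if p col then tb2.set fila ((tb2.getD fila []).set col v) else tb2) tb
      = tb.set fila (cols.foldl (fun r col => if p col then r.set col v else r)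
          (tb.getD fila [])) := by
  induction cols generalizing tb with
  | nil =>
    simp only [List.foldl_nil]
    rw [List.getD_eq_getElem _ _ h, List.set_getElem_self]
  | cons c cs ih =>
    simp only [List.foldl_cons]
    by_cases hc : p c
    · rw [if_pos hc, if_pos hc]
      have h' : fila < (tb.set fila ((tb.getD fila []).set c v)).length := by
        simpa [List.length_set] using h
      rw [ih _ h']
      rw [List.getD_eq_getElem _ _ h', List.getElem_set_self (by simpa using h),
        List.set_set]
    · rw [if_neg hc, if_neg hc, ih _ h]

/-- A's outer loop builds exactly the `mapIdx pvSpecRow` board, prefix by prefix. -/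
theorem pv_A_fold (tablero : List (List Int)) (m : Nat) (hm : m ≤ tablero.length) :
    (List.range m).foldl (fun tb fila =>
      (List.range ((tb.getD fila []).length)).foldl (fun tb2 col =>
        if (fila + col) % 2 == 0 then
          if fila < 3 then tb2.set fila ((tb2.getD fila []).set col 1)
          else if 4 < fila then tb2.set fila ((tb2.getD fila []).set col 2)
          else tb2
        else tb2) tb) tablero
    = tablero.mapIdx (fun i r => if i < m then pvSpecRow i r else r) := by
  induction m with
  | zero =>
    simp only [List.range_zero, List.foldl_nil, Nat.not_lt_zero, if_false]
    apply List.ext_getElem (by simp [List.length_mapIdx])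
    intro j h1 h2
    simp [List.getElem_mapIdx]
  | succ m ih =>
    have hm' : m ≤ tablero.length := by omega
    rw [List.range_succ, List.foldl_append, ih hm', List.foldl_cons, List.foldl_nil]
    set P := tablero.mapIdx (fun i r => if i < m then pvSpecRow i r else r) with hP
    have hlenP : P.length = tablero.length := by simp [hP, List.length_mapIdx]
    have hmP : m < P.length := by omega
    have hrow : P.getD m [] = tablero[m]'(by omega) := by
      rw [List.getD_eq_getElem _ _ hmP]
      simp [hP, List.getElem_mapIdx]
    -- reduce the inner loop over row m to a single set of row m
    have hstep : (List.range ((P.getD m []).length)).foldl (fun tb2 col =>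
        if (m + col) % 2 == 0 then
          if m < 3 then tb2.set m ((tb2.getD m []).set col 1)
          else if 4 < m then tb2.set m ((tb2.getD m []).set col 2)
          else tb2
        else tb2) P
        = P.set m (pvSpecRow m (P.getD m [])) := by
      by_cases h3 : m < 3
      · simp only [if_pos h3]
        rw [pv_inner_set m 1 (fun col => (m + col) % 2 == 0) _ P hmP]
        simp [pvSpecRow, h3, pvRowA]
      · by_cases h4 : 4 < m
        · simp only [if_neg h3, if_pos h4]
          rw [pv_inner_set m 2 (fun col => (m + col) % 2 == 0) _ P hmP]
          simp [pvSpecRow, h3, h4, pvRowA]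
        · simp only [if_neg h3, if_neg h4, ite_self, pv_foldl_id]
          rw [show pvSpecRow m (P.getD m []) = P.getD m [] by simp [pvSpecRow, h3, h4]]
          rw [List.getD_eq_getElem _ _ hmP, List.set_getElem_self]
    rw [hstep]
    -- the set of row m extends the prefix picture from m to m+1
    apply List.ext_getElem (by simp [hP, List.length_set, List.length_mapIdx])
    intro j hj1 hj2
    rw [List.getElem_set]
    by_cases hjm : m = j
    · subst hjm
      rw [if_pos rfl, hrow]
      simp [List.getElem_mapIdx]
    · rw [if_neg hjm]
      have hjP : j < P.length := by simpa [List.length_set] using hj1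
      simp only [hP, List.getElem_mapIdx]
      by_cases hjm' : j < m
      · rw [if_pos hjm', if_pos (by omega)]
      · rw [if_neg hjm', if_neg (by omega)]

-- ===== VERDICT (by name: the statement is the Claim_ definition above) =====
theorem fillV2_spec : Claim_equal_fillV2 := by
  intro tablero _
  show fillV2 tablero = fillV2_alt tablero
  rw [pv_alt_eq]
  unfold fillV2
  rw [pv_A_fold tablero tablero.length (le_refl _)]
  apply List.ext_getElem (by simp [List.length_mapIdx])
  intro j h1 h2
  simp only [List.getElem_mapIdx]
  rw [if_pos (by simpa [List.length_mapIdx] using h2)]
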